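-- pv_equiv track=rewrite | github.com/OccupyMars2025/Introduction-to-Algorithms-4th-Edition | practice_programming/0004. To Buy or Not to Buy/beads.py | count_extra_and_missing_beads
-- ===== SOURCE A (Python) =====
-- from typing import Dict, List, Tuple
--
-- def count_extra_and_missing_beads(total_counts: Dict[str, int], required_counts: Dict[str, int]) -> Tuple[int, int]:
--     """Helper function to count extra and missing beads compared to required beads."""
--     extra_beads = 0
--     for char, total in total_counts.items():
--         required = required_counts.get(char, 0)
--         extra_beads += max(0, total - required)
--     missing_beads = 0
--     for char, required in required_counts.items():
--         missing_beads += max(0, required - total_counts.get(char, 0))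
--     return extra_beads, missing_beads
-- ===== SOURCE B (Python) =====
-- def count_extra_and_missing_beads(total_counts, required_counts):
--     """Sort both item lists by bead name and tally extra/missing in one
--     two-pointer merge; no dict lookups at all."""
--     ts = sorted(total_counts.items(), key=lambda p: p[0])
--     rs = sorted(required_counts.items(), key=lambda p: p[0])
--     n, m = len(ts), len(rs)
--     extra = 0
--     missing = 0
--     i = j = 0
--     while i < n or j < m:
--         if j >= m or (i < n and ts[i][0] < rs[j][0]):
--             extra += max(0, ts[i][1])
--             i += 1
--         elif i >= n or rs[j][0] < ts[i][0]:
--             missing += max(0, rs[j][1])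
--             j += 1
--         else:
--             t = ts[i][1]
--             r = rs[j][1]
--             extra += max(0, t - r)
--             missing += max(0, r - t)
--             i += 1
--             j += 1
--     return extra, missing
-- ===== Notes on version B (the rewrite author's own statement) =====
-- stated objective: alternative
-- what changed: Replaces A's two dict-lookup passes by sorting both item lists by bead name and computing both tallies in a single two-pointer merge of the sorted lists, with no dictionary lookups at all.
import Mathlib
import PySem

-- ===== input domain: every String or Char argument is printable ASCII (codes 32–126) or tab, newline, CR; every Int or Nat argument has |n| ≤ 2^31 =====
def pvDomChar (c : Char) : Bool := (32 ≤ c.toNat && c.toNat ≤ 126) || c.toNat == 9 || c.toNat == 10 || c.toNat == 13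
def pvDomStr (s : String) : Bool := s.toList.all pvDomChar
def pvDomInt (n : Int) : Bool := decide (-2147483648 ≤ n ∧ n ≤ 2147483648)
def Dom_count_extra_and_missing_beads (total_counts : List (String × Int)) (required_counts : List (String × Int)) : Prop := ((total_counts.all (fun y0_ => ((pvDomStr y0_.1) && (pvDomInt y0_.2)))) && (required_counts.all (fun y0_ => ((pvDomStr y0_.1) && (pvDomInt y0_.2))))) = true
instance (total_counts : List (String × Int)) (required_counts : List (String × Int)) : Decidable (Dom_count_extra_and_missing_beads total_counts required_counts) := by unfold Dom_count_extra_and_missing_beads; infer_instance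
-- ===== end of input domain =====

-- B replaces A's two dict-lookup passes by sorting both item lists by key and tallying extra/missing in one two-pointer merge (alternative algorithm, same task).


-- ===== PORT A =====
def count_extra_and_missing_beads (total_counts : List (String × Int)) (required_counts : List (String × Int)) : Int × Int :=
  let extra_beads : Int :=
    total_counts.foldl
      (fun extra_beads p => extra_beads + max 0 (p.2 - (PySem.Dict.mk required_counts).getD p.1 0)) 0
  let missing_beads : Int :=
    required_counts.foldl
      (fun missing_beads p => missing_beads + max 0 (p.2 - (PySem.Dict.mk total_counts).getD p.1 0)) 0
  (extra_beads, missing_beads)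

-- ===== PORT B =====
-- the while loop of Source B: state (i, j, extra, missing) becomes the two list suffixes plus the two accumulators
def pvMergeCount : List (String × Int) → List (String × Int) → Int → Int → Int × Int
  | [], [], e, m => (e, m)
  | (_, t) :: ts, [], e, m => pvMergeCount ts [] (e + max 0 t) m
  | [], (_, r) :: rs, e, m => pvMergeCount [] rs e (m + max 0 r)
  | (kt, t) :: ts, (kr, r) :: rs, e, m =>
    if kt < kr then pvMergeCount ts ((kr, r) :: rs) (e + max 0 t) m
    else if kr < kt then pvMergeCount ((kt, t) :: ts) rs e (m + max 0 r)
    else pvMergeCount ts rs (e + max 0 (t - r)) (m + max 0 (r - t))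
termination_by ts rs _ _ => ts.length + rs.length

def count_extra_and_missing_beads_alt (total_counts : List (String × Int)) (required_counts : List (String × Int)) : Int × Int :=
  let ts := PySem.List.sorted total_counts (fun p => p.1) false
  let rs := PySem.List.sorted required_counts (fun p => p.1) false
  pvMergeCount ts rs 0 0

-- ===== PRECONDITION & SPEC =====
-- Pre_ excludes association lists with a repeated key: such a list does not arise from any Python dict
-- (A's parameters are dicts), so no behaviour of A is defined there.
def Pre_count_extra_and_missing_beads (total_counts : List (String × Int)) (required_counts : List (String × Int)) : Prop :=
  (total_counts.map Prod.fst).Nodup ∧ (required_counts.map Prod.fst).Nodup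
instance (total_counts : List (String × Int)) (required_counts : List (String × Int)) : Decidable (Pre_count_extra_and_missing_beads total_counts required_counts) := by unfold Pre_count_extra_and_missing_beads; infer_instance

def pvWitness_count_extra_and_missing_beads : (List (String × Int)) × (List (String × Int)) :=
  ([("a", 3), ("b", 1)], [("a", 1), ("c", 2)])

def Spec_count_extra_and_missing_beads (total_counts : List (String × Int)) (required_counts : List (String × Int)) (out : Int × Int) : Prop := out = count_extra_and_missing_beads_alt total_counts required_counts
instance (total_counts : List (String × Int)) (required_counts : List (String × Int)) (out : Int × Int) : Decidable (Spec_count_extra_and_missing_beads total_counts required_counts out) := by unfold Spec_count_extra_and_missing_beads; infer_instance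

-- ===== CLAIM (what is proved, stated in full; the proofs are below) =====
def Claim_equal_count_extra_and_missing_beads : Prop := ∀ (total_counts : List (String × Int)) (required_counts : List (String × Int)), Dom_count_extra_and_missing_beads total_counts required_counts → Pre_count_extra_and_missing_beads total_counts required_counts → Spec_count_extra_and_missing_beads total_counts required_counts (count_extra_and_missing_beads total_counts required_counts)

-- ===== LEMMAS AND PROOFS =====

theorem pvGetD_mk_cons (k x : String) (v d : Int) (l : List (String × Int)) :
    (PySem.Dict.mk ((k, v) :: l)).getD x d = if k = x then v else (PySem.Dict.mk l).getD x d := by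
  rw [PySem.Dict.getD_eq_get?_getD, PySem.Dict.getD_eq_get?_getD, PySem.Dict.get?_mk_cons]
  split_ifs with h h' h' <;> simp_all

theorem pvGetD_mk_not_mem (l : List (String × Int)) (k : String) (d : Int)
    (h : k ∉ l.map Prod.fst) : (PySem.Dict.mk l).getD k d = d := by
  apply PySem.Dict.getD_of_not_contains
  rw [PySem.Dict.contains_eq_decide_mem_keys]
  simpa [PySem.Dict.keys] using h

theorem pvGetD_mk_of_lt (l : List (String × Int)) (k : String) (d : Int)
    (h : ∀ p ∈ l, k < p.1) : (PySem.Dict.mk l).getD k d = d := by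
  apply pvGetD_mk_not_mem
  intro hk
  obtain ⟨p, hp, rfl⟩ := List.mem_map.1 hk
  exact lt_irrefl _ (h p hp)

-- merge over strictly key-increasing lists computes exactly A's two dict sums
theorem pvMerge_spec (ts rs : List (String × Int)) (e m : Int)
    (hts : ts.Pairwise (fun a b => a.1 < b.1)) (hrs : rs.Pairwise (fun a b => a.1 < b.1)) :
    pvMergeCount ts rs e m =
      (e + (ts.map (fun p => max 0 (p.2 - (PySem.Dict.mk rs).getD p.1 0))).sum,
       m + (rs.map (fun p => max 0 (p.2 - (PySem.Dict.mk ts).getD p.1 0))).sum) := by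
  fun_induction pvMergeCount ts rs e m with
  | case1 e m => simp
  | case2 kt t ts e m ih =>
    rw [ih (hts.sublist (List.sublist_cons_self _ _)) hrs]
    have h0 : (PySem.Dict.mk ([] : List (String × Int))).getD kt 0 = 0 :=
      pvGetD_mk_not_mem _ _ _ (by simp)
    simp [h0]; ring
  | case3 kr r rs e m ih =>
    rw [ih hts (hrs.sublist (List.sublist_cons_self _ _))]
    have h0 : (PySem.Dict.mk ([] : List (String × Int))).getD kr 0 = 0 :=
      pvGetD_mk_not_mem _ _ _ (by simp)
    simp [h0]; ring
  | case4 kt t ts kr r rs e m hlt ih =>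
    rw [ih (hts.sublist (List.sublist_cons_self _ _)) hrs]
    have hkt0 : (PySem.Dict.mk ((kr, r) :: rs)).getD kt 0 = 0 := by
      apply pvGetD_mk_of_lt
      intro p hp
      rcases List.mem_cons.1 hp with rfl | hp
      · exact hlt
      · exact lt_trans hlt (List.rel_of_pairwise_cons hrs hp)
    have hM : ((kr, r) :: rs).map (fun p => max 0 (p.2 - (PySem.Dict.mk ts).getD p.1 0))
        = ((kr, r) :: rs).map (fun p => max 0 (p.2 - (PySem.Dict.mk ((kt, t) :: ts)).getD p.1 0)) := by
      apply List.map_congr_left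
      intro p hp
      have hne : kt ≠ p.1 := by
        rcases List.mem_cons.1 hp with rfl | hp
        · exact ne_of_lt hlt
        · exact ne_of_lt (lt_trans hlt (List.rel_of_pairwise_cons hrs hp))
      rw [pvGetD_mk_cons, if_neg hne]
    rw [hM]
    simp [hkt0]; ring
  | case5 kt t ts kr r rs e m hnlt hlt ih =>
    rw [ih hts (hrs.sublist (List.sublist_cons_self _ _))]
    have hkr0 : (PySem.Dict.mk ((kt, t) :: ts)).getD kr 0 = 0 := by
      apply pvGetD_mk_of_lt
      intro p hp
      rcases List.mem_cons.1 hp with rfl | hp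
      · exact hlt
      · exact lt_trans hlt (List.rel_of_pairwise_cons hts hp)
    have hE : ((kt, t) :: ts).map (fun p => max 0 (p.2 - (PySem.Dict.mk rs).getD p.1 0))
        = ((kt, t) :: ts).map (fun p => max 0 (p.2 - (PySem.Dict.mk ((kr, r) :: rs)).getD p.1 0)) := by
      apply List.map_congr_left
      intro p hp
      have hne : kr ≠ p.1 := by
        rcases List.mem_cons.1 hp with rfl | hp
        · exact ne_of_lt hlt
        · exact ne_of_lt (lt_trans hlt (List.rel_of_pairwise_cons hts hp))
      rw [pvGetD_mk_cons, if_neg hne]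
    rw [hE]
    simp [hkr0]; ring
  | case6 kt t ts kr r rs e m hnlt hnlt' ih =>
    have heq : kt = kr := le_antisymm (not_lt.1 hnlt') (not_lt.1 hnlt)
    subst heq
    rw [ih (hts.sublist (List.sublist_cons_self _ _)) (hrs.sublist (List.sublist_cons_self _ _))]
    have hE : ts.map (fun p => max 0 (p.2 - (PySem.Dict.mk rs).getD p.1 0))
        = ts.map (fun p => max 0 (p.2 - (PySem.Dict.mk ((kt, r) :: rs)).getD p.1 0)) := by
      apply List.map_congr_left
      intro p hp
      have hne : kt ≠ p.1 := ne_of_lt (List.rel_of_pairwise_cons hts hp)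
      rw [pvGetD_mk_cons, if_neg hne]
    have hM : rs.map (fun p => max 0 (p.2 - (PySem.Dict.mk ts).getD p.1 0))
        = rs.map (fun p => max 0 (p.2 - (PySem.Dict.mk ((kt, t) :: ts)).getD p.1 0)) := by
      apply List.map_congr_left
      intro p hp
      have hne : kt ≠ p.1 := ne_of_lt (List.rel_of_pairwise_cons hrs hp)
      rw [pvGetD_mk_cons, if_neg hne]
    rw [hE, hM]
    have hhe : (PySem.Dict.mk ((kt, r) :: rs)).getD kt 0 = r := by rw [pvGetD_mk_cons, if_pos rfl]
    have hhm : (PySem.Dict.mk ((kt, t) :: ts)).getD kt 0 = t := by rw [pvGetD_mk_cons, if_pos rfl]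
    simp only [List.map_cons, List.sum_cons, hhe, hhm, Prod.mk.injEq]
    constructor <;> ring

-- every lookup in a nodup-keyed dict is invariant under permutation of the item list
theorem pvGetD_perm (l l' : List (String × Int)) (k : String) (d : Int)
    (hp : l'.Perm l) (hnd : (l.map Prod.fst).Nodup) :
    (PySem.Dict.mk l').getD k d = (PySem.Dict.mk l).getD k d := by
  by_cases hk : k ∈ l.map Prod.fst
  · obtain ⟨p, hpl, hfst⟩ := List.mem_map.1 hk
    obtain ⟨kk, v⟩ := p
    subst hfst
    have h1 : (PySem.Dict.mk l).getD kk d = v :=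
      PySem.Dict.getD_of_mem_items _ (by simpa [PySem.Dict.items] using hpl)
        (by simpa [PySem.Dict.keys] using hnd) d
    have h2 : (PySem.Dict.mk l').getD kk d = v :=
      PySem.Dict.getD_of_mem_items _ (by simpa [PySem.Dict.items] using hp.mem_iff.2 hpl)
        (by simpa [PySem.Dict.keys] using ((hp.map Prod.fst).nodup_iff.2 hnd)) d
    rw [h1, h2]
  · rw [pvGetD_mk_not_mem _ _ _ hk,
        pvGetD_mk_not_mem _ _ _ (fun h => hk ((hp.map Prod.fst).mem_iff.1 h))]

-- a nodup-keyed list sorted by key is strictly key-increasing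
theorem pvSorted_strict (l : List (String × Int)) (hnd : (l.map Prod.fst).Nodup) :
    (PySem.List.sorted l (fun p => p.1) false).Pairwise (fun a b => a.1 < b.1) := by
  have hle := PySem.List.sorted_pairwise l (fun p => p.1)
  have hne : (PySem.List.sorted l (fun p => p.1) false).Pairwise (fun a b => a.1 ≠ b.1) := by
    have : ((PySem.List.sorted l (fun p => p.1) false).map Prod.fst).Nodup :=
      (((PySem.List.sorted_perm l (fun p => p.1) false).map Prod.fst).nodup_iff).2 hnd
    rw [List.nodup_iff_pairwise_ne, List.pairwise_map] at this
    exact this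
  exact (hle.and hne).imp (fun h => lt_of_le_of_ne h.1 h.2)

theorem pvFinal (tc rc : List (String × Int))
    (ht : (tc.map Prod.fst).Nodup) (hr : (rc.map Prod.fst).Nodup) :
    count_extra_and_missing_beads tc rc = count_extra_and_missing_beads_alt tc rc := by
  unfold count_extra_and_missing_beads count_extra_and_missing_beads_alt
  rw [pvMerge_spec _ _ _ _ (pvSorted_strict tc ht) (pvSorted_strict rc hr)]
  rw [PySem.List.foldl_add, PySem.List.foldl_add]
  have hpt := PySem.List.sorted_perm tc (fun p => p.1) false
  have hpr := PySem.List.sorted_perm rc (fun p => p.1) false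
  have hE : ((PySem.List.sorted tc (fun p => p.1) false).map
      (fun p => max 0 (p.2 - (PySem.Dict.mk (PySem.List.sorted rc (fun p => p.1) false)).getD p.1 0))).sum
      = (tc.map (fun p => max 0 (p.2 - (PySem.Dict.mk rc).getD p.1 0))).sum := by
    calc ((PySem.List.sorted tc (fun p => p.1) false).map
        (fun p => max 0 (p.2 - (PySem.Dict.mk (PySem.List.sorted rc (fun p => p.1) false)).getD p.1 0))).sum
        = ((PySem.List.sorted tc (fun p => p.1) false).map
            (fun p => max 0 (p.2 - (PySem.Dict.mk rc).getD p.1 0))).sum := by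
          congr 1
          apply List.map_congr_left
          intro p _
          rw [pvGetD_perm _ _ _ _ hpr hr]
      _ = _ := (hpt.map _).sum_eq
  have hM : ((PySem.List.sorted rc (fun p => p.1) false).map
      (fun p => max 0 (p.2 - (PySem.Dict.mk (PySem.List.sorted tc (fun p => p.1) false)).getD p.1 0))).sum
      = (rc.map (fun p => max 0 (p.2 - (PySem.Dict.mk tc).getD p.1 0))).sum := by
    calc ((PySem.List.sorted rc (fun p => p.1) false).map
        (fun p => max 0 (p.2 - (PySem.Dict.mk (PySem.List.sorted tc (fun p => p.1) false)).getD p.1 0))).sum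
        = ((PySem.List.sorted rc (fun p => p.1) false).map
            (fun p => max 0 (p.2 - (PySem.Dict.mk tc).getD p.1 0))).sum := by
          congr 1
          apply List.map_congr_left
          intro p _
          rw [pvGetD_perm _ _ _ _ hpt ht]
      _ = _ := (hpr.map _).sum_eq
  rw [hE, hM]

-- ===== VERDICT (by name: the statement is the Claim_ definition above) =====
theorem count_extra_and_missing_beads_spec : Claim_equal_count_extra_and_missing_beads := by
  intro tc rc _ hpre
  unfold Spec_count_extra_and_missing_beads
  exact pvFinal tc rc hpre.1 hpre.2
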